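-- pv_equiv track=rewrite | github.com/lyksj513/longtext20260110 | 模块1长文本拆分.py | find_optimal_boundary
-- ===== SOURCE A (Python) =====
-- from typing import List
--
-- def find_optimal_boundary(text: str, target_pos: int, boundaries: List[int]) -> int:
--     if not boundaries:
--         return target_pos
--     prev_boundaries = [b for b in boundaries if b <= target_pos]
--     next_boundaries = [b for b in boundaries if b > target_pos]
--     if prev_boundaries:
--         return max(prev_boundaries)
--     elif next_boundaries:
--         return min(next_boundaries)
--     else:
--         return target_pos
-- ===== SOURCE B (Python) =====
-- def find_optimal_boundary(text: str, target_pos: int, boundaries) -> int: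
--     if not boundaries:
--         return target_pos
--     bs = sorted(boundaries)
--     # binary search for the partition point: number of elements <= target_pos
--     lo, hi = 0, len(bs)
--     while lo < hi:
--         mid = (lo + hi) // 2
--         if bs[mid] <= target_pos:
--             lo = mid + 1
--         else:
--             hi = mid
--     if lo > 0:
--         return bs[lo - 1]   # largest boundary <= target_pos
--     return bs[0]            # all boundaries > target_pos: the smallest one
-- ===== Notes on version B (the rewrite author's own statement) =====
-- stated objective: alternative
-- what changed: Instead of building two filtered lists and reducing them with max()/min(), B sorts the boundaries once and binary-searches for the partition point (count of elements <= target_pos), then indexes the sorted list: bs[lo-1] is the largest boundary <= target_pos, bs[0] the smallest one when all are above.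
import Mathlib
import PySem

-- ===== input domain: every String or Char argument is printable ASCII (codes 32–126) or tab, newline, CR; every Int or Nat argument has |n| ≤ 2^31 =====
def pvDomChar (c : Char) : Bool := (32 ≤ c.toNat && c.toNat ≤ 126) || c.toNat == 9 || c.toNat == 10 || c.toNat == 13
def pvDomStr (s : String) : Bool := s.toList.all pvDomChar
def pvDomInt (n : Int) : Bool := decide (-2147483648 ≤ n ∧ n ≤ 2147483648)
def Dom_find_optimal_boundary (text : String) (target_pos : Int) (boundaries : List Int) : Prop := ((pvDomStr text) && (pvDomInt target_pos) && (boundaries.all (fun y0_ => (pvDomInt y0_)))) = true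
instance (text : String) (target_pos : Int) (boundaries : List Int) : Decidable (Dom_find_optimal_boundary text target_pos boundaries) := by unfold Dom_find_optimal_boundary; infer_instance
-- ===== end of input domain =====

-- B sorts the boundaries once and binary-searches for the partition point instead of A's two filtered lists with max()/min() (alternative algorithm, same result).


-- ===== PORT A =====
-- Port of A: the two filtered lists, then max of the first if nonempty, else min of the second.
def find_optimal_boundary (text : String) (target_pos : Int) (boundaries : List Int) : Int :=
  if boundaries = [] then target_pos
  else
    let prev_boundaries := boundaries.filter (fun b => decide (b ≤ target_pos))
    let next_boundaries := boundaries.filter (fun b => decide (b > target_pos))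
    if prev_boundaries ≠ [] then
      (PySem.List.max? prev_boundaries (fun x => x)).getD 0   -- guard makes the list nonempty, so `none` never occurs
    else if next_boundaries ≠ [] then
      (PySem.List.min? next_boundaries (fun x => x)).getD 0   -- guard makes the list nonempty, so `none` never occurs
    else target_pos

-- ===== PORT B =====
-- B's hand-written binary-search loop: `while lo < hi: mid = (lo+hi)//2; …`.
-- bs[mid] is ported as getD mid 0; mid is always in range (lo ≤ mid < hi ≤ len bs), so the default never occurs.
def pvBS (bs : List Int) (t : Int) (lo hi : Nat) : Nat :=
  if lo < hi then
    let mid := (lo + hi) / 2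
    if bs.getD mid 0 ≤ t then pvBS bs t (mid + 1) hi else pvBS bs t lo mid
  else lo
termination_by hi - lo
decreasing_by all_goals omega

-- Port of B: sort, binary-search the partition point lo, then index the sorted list.
def find_optimal_boundary_alt (text : String) (target_pos : Int) (boundaries : List Int) : Int :=
  if boundaries = [] then target_pos
  else
    let bs := PySem.List.sorted boundaries (fun x => x) false
    let lo := pvBS bs target_pos 0 bs.length
    if lo > 0 then bs.getD (lo - 1) 0   -- largest boundary ≤ target_pos
    else bs.getD 0 0                    -- all boundaries > target_pos: the smallest one

-- ===== PRECONDITION & SPEC =====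
def Spec_find_optimal_boundary (text : String) (target_pos : Int) (boundaries : List Int) (out : Int) : Prop := out = find_optimal_boundary_alt text target_pos boundaries
instance (text : String) (target_pos : Int) (boundaries : List Int) (out : Int) : Decidable (Spec_find_optimal_boundary text target_pos boundaries out) := by unfold Spec_find_optimal_boundary; infer_instance

-- ===== CLAIM (what is proved, stated in full; the proofs are below) =====
def Claim_equal_find_optimal_boundary : Prop := ∀ (text : String) (target_pos : Int) (boundaries : List Int), Dom_find_optimal_boundary text target_pos boundaries → Spec_find_optimal_boundary text target_pos boundaries (find_optimal_boundary text target_pos boundaries)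

-- ===== LEMMAS AND PROOFS =====

-- The binary search returns a partition point: everything before it is ≤ t, everything from it on is > t.
theorem pvBS_spec (bs : List Int) (t : Int)
    (hmono : ∀ i j : Nat, i ≤ j → j < bs.length → bs.getD i 0 ≤ bs.getD j 0) :
    ∀ lo hi : Nat, lo ≤ hi → hi ≤ bs.length →
      (∀ i : Nat, i < lo → bs.getD i 0 ≤ t) →
      (∀ i : Nat, hi ≤ i → i < bs.length → t < bs.getD i 0) →
      pvBS bs t lo hi ≤ bs.length ∧
      (∀ i : Nat, i < pvBS bs t lo hi → bs.getD i 0 ≤ t) ∧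
      (∀ i : Nat, pvBS bs t lo hi ≤ i → i < bs.length → t < bs.getD i 0) := by
  intro lo hi
  induction lo, hi using pvBS.induct bs t with
  | case1 lo hi hlt mid hle ih =>
    intro hlohi hhilen hlow hhigh
    rw [pvBS, if_pos hlt, if_pos hle]
    have hmid : mid < bs.length := by omega
    refine ih (by omega) hhilen ?_ hhigh
    intro i hi'
    exact le_trans (hmono i mid (by omega) hmid) hle
  | case2 lo hi hlt mid hgt ih =>
    intro hlohi hhilen hlow hhigh
    rw [pvBS, if_pos hlt, if_neg hgt]
    refine ih (by omega) (by omega) hlow ?_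
    intro i hmi hilen
    exact lt_of_lt_of_le (by omega) (hmono mid i hmi hilen)
  | case3 lo hi hnlt =>
    intro hlohi hhilen hlow hhigh
    rw [pvBS, if_neg hnlt]
    exact ⟨by omega, hlow, fun i h1 h2 => hhigh i (by omega) h2⟩

theorem find_optimal_boundary_eq_alt (text : String) (target_pos : Int) (boundaries : List Int) :
    find_optimal_boundary text target_pos boundaries = find_optimal_boundary_alt text target_pos boundaries := by
  unfold find_optimal_boundary find_optimal_boundary_alt
  by_cases hnil : boundaries = []
  · simp [hnil]
  · simp only [hnil, if_false]
    set bs := PySem.List.sorted boundaries (fun x => x) false with hbs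
    have hperm : bs.Perm boundaries := PySem.List.sorted_perm boundaries (fun x => x) false
    have hmem : ∀ x : Int, x ∈ bs ↔ x ∈ boundaries := fun x => hperm.mem_iff
    have hbsne : bs ≠ [] := by
      intro h; exact hnil ((PySem.List.sorted_eq_nil_iff boundaries (fun x => x) false).mp h)
    have hmono : ∀ i j : Nat, i ≤ j → j < bs.length → bs.getD i 0 ≤ bs.getD j 0 := by
      intro i j hij hj
      have hi' : i < bs.length := lt_of_le_of_lt hij hj
      rw [List.getD_eq_getElem bs 0 hi', List.getD_eq_getElem bs 0 hj]
      exact PySem.List.sorted_id_getElem_mono boundaries hij hj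
    obtain ⟨hk_len, hk_le, hk_gt⟩ :=
      pvBS_spec bs target_pos hmono 0 bs.length (Nat.zero_le _) le_rfl
        (fun i h => absurd h (Nat.not_lt_zero i)) (fun i h1 h2 => absurd h2 (by omega))
    set k := pvBS bs target_pos 0 bs.length with hk
    -- every member of bs is some bs[i]
    have hidx : ∀ x : Int, x ∈ bs → ∃ i : Nat, i < bs.length ∧ bs.getD i 0 = x := by
      intro x hx
      obtain ⟨i, hi, hxi⟩ := List.getElem_of_mem hx
      exact ⟨i, hi, by rw [List.getD_eq_getElem bs 0 hi]; exact hxi⟩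
    by_cases hkpos : k > 0
    · -- bs[k-1] is the largest boundary ≤ target_pos
      have hklen : k - 1 < bs.length := by omega
      have hm_le : bs.getD (k - 1) 0 ≤ target_pos := hk_le (k - 1) (by omega)
      have hm_mem : bs.getD (k - 1) 0 ∈ boundaries := by
        rw [← hmem]
        rw [List.getD_eq_getElem bs 0 hklen]
        exact List.getElem_mem hklen
      have hmemf : bs.getD (k - 1) 0 ∈ boundaries.filter (fun b => decide (b ≤ target_pos)) := by
        rw [List.mem_filter]; exact ⟨hm_mem, by simpa using hm_le⟩
      have hprev_ne : boundaries.filter (fun b => decide (b ≤ target_pos)) ≠ [] := by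
        intro h
        rw [h] at hmemf; exact absurd hmemf (List.not_mem_nil)
      simp only [hprev_ne, if_pos, ne_eq, not_false_eq_true,  hkpos]
      obtain ⟨m, hmeq⟩ : ∃ m, PySem.List.max? (boundaries.filter (fun b => decide (b ≤ target_pos))) (fun x => x) = some m := by
        cases hmm : PySem.List.max? (boundaries.filter (fun b => decide (b ≤ target_pos))) (fun x => x) with
        | none => exact absurd (((PySem.List.max?_eq_none_iff _ _).mp hmm)) hprev_ne
        | some m => exact ⟨m, rfl⟩
      rw [hmeq]
      have hm_in : m ∈ boundaries.filter (fun b => decide (b ≤ target_pos)) := PySem.List.max?_mem hmeq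
      have hm_max : ∀ y ∈ boundaries.filter (fun b => decide (b ≤ target_pos)), y ≤ m :=
        PySem.List.max?_isMax hmeq
      -- m ≤ bs[k-1]
      obtain ⟨hmB, hmle⟩ := List.mem_filter.mp hm_in
      obtain ⟨i, hi, hieq⟩ := hidx m ((hmem m).mpr hmB)
      have hik : i < k := by
        by_contra hik
        have := hk_gt i (by omega) hi
        rw [hieq] at this
        simp at hmle; omega
      have h1 : m ≤ bs.getD (k - 1) 0 := by
        rw [← hieq]; exact hmono i (k - 1) (by omega) hklen
      have h2 : bs.getD (k - 1) 0 ≤ m :=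
        hm_max _ hmemf
      exact (le_antisymm h2 h1).symm
    · -- k = 0: every boundary is > target_pos
      have hk0 : k = 0 := by omega
      have hall : ∀ b ∈ boundaries, target_pos < b := by
        intro b hb
        obtain ⟨i, hi, hieq⟩ := hidx b ((hmem b).mpr hb)
        have := hk_gt i (by omega) hi
        rwa [hieq] at this
      have hprev_nil : boundaries.filter (fun b => decide (b ≤ target_pos)) = [] := by
        rw [List.filter_eq_nil_iff]
        intro b hb
        simpa using not_le.mpr (hall b hb)
      have hnext_eq : boundaries.filter (fun b => decide (b > target_pos)) = boundaries := by
        rw [List.filter_eq_self]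
        intro b hb; simpa using hall b hb
      simp only [hprev_nil, ne_eq, not_true_eq_false, if_false, hnext_eq, hnil,
        not_false_eq_true,  hkpos]
      obtain ⟨m, hmeq⟩ : ∃ m, PySem.List.min? boundaries (fun x => x) = some m := by
        cases hmm : PySem.List.min? boundaries (fun x => x) with
        | none => exact absurd (((PySem.List.min?_eq_none_iff _ _).mp hmm)) hnil
        | some m => exact ⟨m, rfl⟩
      rw [hmeq]
      have h0len : 0 < bs.length := List.length_pos_iff.mpr hbsne
      have h0mem : bs.getD 0 0 ∈ boundaries := by
        rw [← hmem, List.getD_eq_getElem bs 0 h0len]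
        exact List.getElem_mem h0len
      have h1 : m ≤ bs.getD 0 0 := PySem.List.min?_isMin hmeq _ h0mem
      have h2 : bs.getD 0 0 ≤ m := by
        obtain ⟨i, hi, hieq⟩ := hidx m ((hmem m).mpr (PySem.List.min?_mem hmeq))
        rw [← hieq]; exact hmono 0 i (Nat.zero_le i) hi
      exact (le_antisymm h2 h1).symm

-- ===== VERDICT (by name: the statement is the Claim_ definition above) =====
theorem find_optimal_boundary_spec : Claim_equal_find_optimal_boundary := by
  intro text target_pos boundaries _
  unfold Spec_find_optimal_boundary
  exact find_optimal_boundary_eq_alt text target_pos boundaries
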